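-- pv_equiv track=rewrite | github.com/NaayoungKwon/AlgorithmStudy | 백준/Gold/15686. 치킨 배달/치킨 배달.py | solution
-- ===== SOURCE A (Python) =====
-- import itertools
--
-- def solution(n, m, arr):
--
--     # homes를 전부 구한다
--     homes = []
--     markets = []
--     # markets를 전부 구한다
--     for i in range(n):
--         for j in range(n):
--             if arr[i][j] == 1:
--                 homes.append([i,j])
--             elif arr[i][j] == 2:
--                 markets.append([i,j])
--     # hl (home과의 거리) [i][j] = home[i]와 market[j]와의 거리
--     hl = [[0] * len(markets) for _ in range(len(homes))]
--     for i in range(len(homes)):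
--         for j in range(len(markets)):
--             l = abs(homes[i][0] - markets[j][0]) + abs(homes[i][1] - markets[j][1])
--             hl[i][j] = l
--
--     # markets 중 m개를 픽 kCm
--     mk = 10000 * 100
--     for ks in itertools.combinations(list(range(len(markets))), m):
--         mi = 0
--         for i in range(len(homes)):
--             mr = 10000
--             for k in ks:
--                 mr = min(mr, hl[i][k])
--             mi += mr
--         mk = min(mk, mi)
--     # homes에서 min을 각각 구한다
--     return mk
-- ===== SOURCE B (Python) =====
-- def solution(n, m, arr):
--     homes = []
--     markets = []
--     for i in range(n):
--         for j in range(n):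
--             if arr[i][j] == 1:
--                 homes.append((i, j))
--             elif arr[i][j] == 2:
--                 markets.append((i, j))
--
--     # Branch-and-recurse over the market list: either take the first market
--     # (capping every home's current best distance with it) or skip it.
--     # Shared prefixes of combinations reuse the already-capped distances.
--     def go(ms, need, dists):
--         if need == 0:
--             return sum(dists)
--         if len(ms) < need:
--             return 10000 * 100
--         (mx, my) = ms[0]
--         take = go(ms[1:], need - 1,
--                   [min(d, abs(h[0] - mx) + abs(h[1] - my)) for h, d in zip(homes, dists)])
--         skip = go(ms[1:], need, dists)
--         return min(take, skip)
--
--     return min(10000 * 100, go(markets, m, [10000] * len(homes)))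
-- ===== Notes on version B (the rewrite author's own statement) =====
-- stated objective: alternative
-- what changed: A precomputes a full home-by-market distance matrix and then, for every itertools.combinations index tuple, rescans it with nested index loops; B drops the table and the combinations call entirely and instead does a take-or-skip recursion over the market list carrying each home's current best (10000-capped) distance, so combinations sharing a prefix reuse already-capped distances, finally capping the result with the same 10000*100 sentinel.
import Mathlib
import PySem

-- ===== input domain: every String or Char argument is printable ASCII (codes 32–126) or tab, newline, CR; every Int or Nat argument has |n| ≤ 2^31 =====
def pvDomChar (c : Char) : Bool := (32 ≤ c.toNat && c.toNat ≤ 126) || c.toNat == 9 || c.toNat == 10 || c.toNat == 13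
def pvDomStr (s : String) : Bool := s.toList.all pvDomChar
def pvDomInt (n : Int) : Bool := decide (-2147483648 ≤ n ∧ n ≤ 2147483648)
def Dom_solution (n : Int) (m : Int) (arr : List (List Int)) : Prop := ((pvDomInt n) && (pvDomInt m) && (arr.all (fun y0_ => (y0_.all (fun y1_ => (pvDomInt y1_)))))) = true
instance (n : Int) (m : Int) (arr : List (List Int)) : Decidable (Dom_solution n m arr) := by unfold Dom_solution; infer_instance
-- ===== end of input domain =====

-- B replaces A's "precomputed distance table + itertools.combinations over index
-- tuples" with a take-or-skip recursion over the market list carrying each home's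
-- current best distance, so combinations sharing a prefix reuse the already-capped
-- distances (objective: alternative algorithm, same exact result).

-- ===== PORT A =====

-- shared by both Pythons verbatim: the double loop over range(n) collecting homes and markets
def pvExtract (n : Int) (arr : List (List Int)) : List (Int × Int) × List (Int × Int) :=
  (PySem.List.pyRange 0 n 1).foldl (fun st i =>
    (PySem.List.pyRange 0 n 1).foldl (fun st j =>
      let v := (PySem.List.pyGet? ((PySem.List.pyGet? arr i).getD []) j).getD 0
      if v = 1 then (st.1 ++ [(i, j)], st.2)
      else if v = 2 then (st.1, st.2 ++ [(i, j)])
      else st) st) ([], [])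

-- A: build the full home×market distance matrix hl (the double index loop writing
-- hl[i][j] is ported as the map of maps producing the same matrix row by row), then
-- fold itertools.combinations of the index list; the home-index loop reading hl[i]
-- is the fold over hl's rows.  m < 0 makes Python's combinations raise ValueError
-- (outside Pre_solution), so 'm.toNat' is exact on the admitted inputs.
def solution (n : Int) (m : Int) (arr : List (List Int)) : Int :=
  let hm := pvExtract n arr
  let homes := hm.1
  let markets := hm.2
  let hl : List (List Int) :=
    homes.map (fun h => markets.map (fun mk => |h.1 - mk.1| + |h.2 - mk.2|))
  (PySem.List.combinations (PySem.List.pyRange 0 (PySem.List.len markets) 1) m.toNat).foldl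
    (fun mk ks =>
      min mk (hl.foldl (fun mi row =>
        mi + ks.foldl (fun mr k => min mr (PySem.List.pyGetD row k 0)) 10000) 0))
    (10000 * 100)

-- ===== PORT B =====

-- the comprehension [min(d, abs(h[0]-mx)+abs(h[1]-my)) for h, d in zip(homes, dists)]
def pvCap (homes : List (Int × Int)) (mk0 : Int × Int) (dists : List Int) : List Int :=
  (homes.zip dists).map (fun p => min p.2 (|p.1.1 - mk0.1| + |p.1.2 - mk0.2|))

-- go(ms, need, dists): take ms[0] (capping dists) or skip it.  When ms = [] and
-- need > 0 Python returns the sentinel via the 'len(ms) < need' test; for need < 0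
-- Python raises IndexError on ms[0] (outside Pre_solution), the port returns the sentinel.
def pvGo (homes : List (Int × Int)) (ms : List (Int × Int)) (need : Int) (dists : List Int) : Int :=
  if need = 0 then dists.sum
  else
    match ms with
    | [] => 10000 * 100
    | mk0 :: rest =>
      if PySem.List.len (mk0 :: rest) < need then 10000 * 100
      else
        min (pvGo homes rest (need - 1) (pvCap homes mk0 dists))
            (pvGo homes rest need dists)

def solution_alt (n : Int) (m : Int) (arr : List (List Int)) : Int :=
  let hm := pvExtract n arr
  min (10000 * 100) (pvGo hm.1 hm.2 m (List.replicate hm.1.length 10000))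

-- ===== PRECONDITION & SPEC =====
-- Exactly where the Python A returns: m < 0 makes itertools.combinations raise
-- ValueError, and the scanned part of the grid (rows 0..n-1, columns 0..n-1) must
-- exist or arr[i][j] raises IndexError.  Rows beyond the first n are unconstrained.
def Pre_solution (n : Int) (m : Int) (arr : List (List Int)) : Prop :=
  0 ≤ m ∧ n.toNat ≤ arr.length ∧ ∀ row ∈ arr.take n.toNat, n.toNat ≤ row.length
instance (n : Int) (m : Int) (arr : List (List Int)) : Decidable (Pre_solution n m arr) := by
  unfold Pre_solution; infer_instance

def pvWitness_solution : Int × Int × List (List Int) := (2, 1, [[1, 2], [0, 2]])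

def Spec_solution (n : Int) (m : Int) (arr : List (List Int)) (out : Int) : Prop := out = solution_alt n m arr
instance (n : Int) (m : Int) (arr : List (List Int)) (out : Int) : Decidable (Spec_solution n m arr out) := by unfold Spec_solution; infer_instance

-- ===== CLAIM (what is proved, stated in full; the proofs are below) =====
def Claim_equal_solution : Prop := ∀ (n : Int) (m : Int) (arr : List (List Int)), Dom_solution n m arr → Pre_solution n m arr → Spec_solution n m arr (solution n m arr)

-- ===== LEMMAS AND PROOFS =====

-- the value B attributes to a finished combination c of markets, started from dists
def pvVal (homes : List (Int × Int)) (c : List (Int × Int)) (dists : List Int) : Int :=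
  (c.foldl (fun ds mk0 => pvCap homes mk0 ds) dists).sum

theorem foldr_min_min (L : List Int) (a b : Int) :
    L.foldr min (min a b) = min (L.foldr min a) b := by
  induction L with
  | nil => rfl
  | cons x L ih =>
    simp only [List.foldr_cons, ih]
    rw [← min_assoc]

theorem foldl_min_map {α : Type} (L : List α) (g : α → Int) (b : Int) :
    L.foldl (fun acc x => min acc (g x)) b = (L.map g).foldr min b := by
  induction L generalizing b with
  | nil => rfl
  | cons x L ih =>
    simp only [List.foldl_cons, List.map_cons, List.foldr_cons]
    rw [ih, foldr_min_min, min_comm]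

theorem pvGo_cons (homes : List (Int × Int)) (mk0 : Int × Int) (rest : List (Int × Int))
    (need : Int) (dists : List Int) (h0 : need ≠ 0) :
    pvGo homes (mk0 :: rest) need dists
      = if PySem.List.len (mk0 :: rest) < need then 10000 * 100
        else min (pvGo homes rest (need - 1) (pvCap homes mk0 dists))
                 (pvGo homes rest need dists) := by
  conv_lhs => unfold pvGo
  rw [if_neg h0]

-- B's recursion, capped by the sentinel, is the foldr-min of pvVal over exactly the
-- combinations A enumerates
theorem pvGo_eq (homes : List (Int × Int)) (ms : List (Int × Int)) (r : Nat) (dists : List Int) :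
    min (10000 * 100) (pvGo homes ms (r : Int) dists)
      = ((PySem.List.combinations ms r).map (fun c => pvVal homes c dists)).foldr
          min (10000 * 100) := by
  induction ms generalizing r dists with
  | nil =>
    cases r with
    | zero =>
      have hgo : pvGo homes [] ((0 : Nat) : Int) dists = dists.sum := by
        unfold pvGo; simp
      rw [hgo, PySem.List.combinations_zero]
      simp only [List.map_cons, List.map_nil, List.foldr_cons, List.foldr_nil, pvVal,
        List.foldl_nil]
      exact min_comm _ _
    | succ r' =>
      have hgo : pvGo homes [] ((r' + 1 : Nat) : Int) dists = 10000 * 100 := by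
        unfold pvGo
        rw [if_neg (Int.natCast_ne_zero.mpr (Nat.succ_ne_zero r'))]
      rw [hgo, PySem.List.combinations_nil_succ]
      simp
  | cons mk0 rest ih =>
    cases r with
    | zero =>
      have hgo : pvGo homes (mk0 :: rest) ((0 : Nat) : Int) dists = dists.sum := by
        unfold pvGo; simp
      rw [hgo, PySem.List.combinations_zero]
      simp only [List.map_cons, List.map_nil, List.foldr_cons, List.foldr_nil, pvVal,
        List.foldl_nil]
      exact min_comm _ _
    | succ r' =>
      have hne : ((r' + 1 : Nat) : Int) ≠ 0 := Int.natCast_ne_zero.mpr (Nat.succ_ne_zero r')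
      by_cases hlen : (mk0 :: rest).length < r' + 1
      · rw [PySem.List.combinations_eq_nil_of_length_lt _ hlen]
        have hgo : pvGo homes (mk0 :: rest) ((r' + 1 : Nat) : Int) dists = 10000 * 100 := by
          rw [pvGo_cons homes mk0 rest _ dists hne,
            if_pos (by rw [PySem.List.len_eq]; exact_mod_cast hlen)]
        rw [hgo]
        simp
      · have hlen' : ¬ (PySem.List.len (mk0 :: rest) < ((r' + 1 : Nat) : Int)) := by
          rw [PySem.List.len_eq]; exact_mod_cast hlen
        have hcast : ((r' + 1 : Nat) : Int) - 1 = ((r' : Nat) : Int) := by push_cast; ring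
        have hgo : pvGo homes (mk0 :: rest) ((r' + 1 : Nat) : Int) dists
            = min (pvGo homes rest ((r' : Nat) : Int) (pvCap homes mk0 dists))
                  (pvGo homes rest ((r' + 1 : Nat) : Int) dists) := by
          rw [pvGo_cons homes mk0 rest _ dists hne, if_neg hlen', hcast]
        have hmap : (PySem.List.combinations rest r').map
              ((fun c => pvVal homes c dists) ∘ (fun c => mk0 :: c))
            = (PySem.List.combinations rest r').map
              (fun c => pvVal homes c (pvCap homes mk0 dists)) := by
          apply List.map_congr_left
          intro c _
          simp [pvVal, List.foldl_cons]
        rw [PySem.List.combinations_cons_succ, List.map_append, List.foldr_append,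
          List.map_map, hmap, ← ih (r' + 1) dists, foldr_min_min, ← ih r' (pvCap homes mk0 dists),
          hgo, min_assoc]

theorem map_getD_range_self {α : Type} (xs : List α) (d : α) :
    (List.range xs.length).map (fun k => xs.getD k d) = xs := by
  apply List.ext_getElem (by simp)
  intro i h1 h2
  simp [List.getD_eq_getElem?_getD, List.getElem?_eq_getElem h2]

theorem pvCap_map (homes : List (Int × Int)) (mk0 : Int × Int) (f : (Int × Int) → Int) :
    pvCap homes mk0 (homes.map f)
      = homes.map (fun h => min (f h) (|h.1 - mk0.1| + |h.2 - mk0.2|)) := by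
  induction homes with
  | nil => rfl
  | cons h hs ih => simpa [pvCap] using ih

-- the B-side fold of caps, started from a pointwise family over homes, is pointwise
theorem applyAll_map (homes : List (Int × Int)) (c : List (Int × Int)) (f : (Int × Int) → Int) :
    c.foldl (fun ds mk0 => pvCap homes mk0 ds) (homes.map f)
      = homes.map (fun h => c.foldl (fun d mk0 => min d (|h.1 - mk0.1| + |h.2 - mk0.2|)) (f h)) := by
  induction c generalizing f with
  | nil => rfl
  | cons mk0 c ih =>
    simp only [List.foldl_cons, pvCap_map, ih]

-- A's per-combination value (fold over hl's rows with index lookups) is B's pvVal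
-- of the corresponding market combination
theorem perCombo (homes markets : List (Int × Int)) (ks : List Nat)
    (hks : ∀ k ∈ ks, k < markets.length) :
    (homes.map (fun h => markets.map (fun mk => |h.1 - mk.1| + |h.2 - mk.2|))).foldl
        (fun mi row => mi + (ks.map (fun (k : Nat) => (k : Int))).foldl
          (fun mr k => min mr (PySem.List.pyGetD row k 0)) 10000) 0
      = pvVal homes (ks.map (fun k => markets.getD k (0, 0))) (List.replicate homes.length 10000) := by
  have hrep : List.replicate homes.length (10000 : Int) = homes.map (fun _ => 10000) := by
    simp
  rw [pvVal, hrep, applyAll_map, List.foldl_map, PySem.List.foldl_add, zero_add]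
  apply congrArg
  apply List.map_congr_left
  intro h _
  rw [List.foldl_map, List.foldl_map]
  apply PySem.List.foldl_congr_mem
  intro acc k hk
  have hklt := hks k hk
  rw [PySem.List.pyGetD_natCast, List.getD_eq_getElem?_getD, List.getD_eq_getElem?_getD,
    List.getElem?_map, List.getElem?_eq_getElem hklt]
  rfl

-- the whole pipeline, for the extracted homes/markets lists and a nonnegative count
theorem main_eq (homes markets : List (Int × Int)) (r : Nat) :
    (PySem.List.combinations (PySem.List.pyRange 0 (PySem.List.len markets) 1) r).foldl
        (fun mk ks =>
          min mk ((homes.map (fun h => markets.map (fun mk => |h.1 - mk.1| + |h.2 - mk.2|))).foldl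
            (fun mi row => mi + ks.foldl (fun mr k => min mr (PySem.List.pyGetD row k 0)) 10000) 0))
        (10000 * 100)
      = min (10000 * 100) (pvGo homes markets (r : Int) (List.replicate homes.length 10000)) := by
  have hidx : PySem.List.pyRange 0 (PySem.List.len markets) 1
      = (List.range markets.length).map (fun (k : Nat) => (k : Int)) := by
    rw [PySem.List.pyRange_one]
    have hL : ((PySem.List.len markets - 0 : Int)).toNat = markets.length := by
      rw [PySem.List.len_eq]; simp
    rw [hL]
    apply List.map_congr_left
    intro k _
    exact zero_add _
  have hmkts : (List.range markets.length).map (fun k => markets.getD k ((0 : Int), (0 : Int)))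
      = markets := map_getD_range_self markets (0, 0)
  rw [foldl_min_map, hidx, PySem.List.combinations_map, List.map_map,
    pvGo_eq homes markets r]
  conv_rhs => rw [← hmkts]
  rw [PySem.List.combinations_map, List.map_map]
  apply congrArg (List.foldr min (10000 * 100))
  apply List.map_congr_left
  intro ks hksmem
  have hsub : ks.Sublist (List.range markets.length) :=
    PySem.List.sublist_of_mem_combinations hksmem
  have hks : ∀ k ∈ ks, k < markets.length := by
    intro k hk
    have := hsub.subset hk
    simpa [List.mem_range] using this
  simpa using perCombo homes markets ks hks

-- ===== VERDICT (by name: the statement is the Claim_ definition above) =====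
theorem solution_spec : Claim_equal_solution := by
  intro n m arr _ hpre
  unfold Spec_solution solution solution_alt
  have hm : ((m.toNat : Nat) : Int) = m := Int.toNat_of_nonneg hpre.1
  rw [← hm]
  exact main_eq (pvExtract n arr).1 (pvExtract n arr).2 m.toNat
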